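-- pv_equiv track=rewrite | github.com/CosimaModo/modo-charts | build_enhanced_deals.py | extract_lead_sponsor
-- ===== SOURCE A (Python) =====
-- def extract_lead_sponsor(sponsors):
--     """Extract lead sponsor (developer or first entry)."""
--     for name, role in sponsors:
--         if role == "developer":
--             return name
--     for name, role in sponsors:
--         if role == "spv":
--             return name
--     return sponsors[0][0] if sponsors else ""
-- ===== SOURCE B (Python) =====
-- def extract_lead_sponsor(sponsors):
--     """Extract lead sponsor (developer or first entry)."""
--     spv = None
--     first = None
--     for name, role in sponsors:
--         if role == "developer":
--             return name
--         if spv is None and role == "spv":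
--             spv = name
--         if first is None:
--             first = name
--     if spv is not None:
--         return spv
--     return first if first is not None else ""
-- ===== Notes on version B (the rewrite author's own statement) =====
-- stated objective: simpler
-- what changed: Replaced A's two sequential scans plus indexed fallback by one single-pass loop that returns on the first developer and remembers the first spv name and the first name as fallbacks.
import Mathlib
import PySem

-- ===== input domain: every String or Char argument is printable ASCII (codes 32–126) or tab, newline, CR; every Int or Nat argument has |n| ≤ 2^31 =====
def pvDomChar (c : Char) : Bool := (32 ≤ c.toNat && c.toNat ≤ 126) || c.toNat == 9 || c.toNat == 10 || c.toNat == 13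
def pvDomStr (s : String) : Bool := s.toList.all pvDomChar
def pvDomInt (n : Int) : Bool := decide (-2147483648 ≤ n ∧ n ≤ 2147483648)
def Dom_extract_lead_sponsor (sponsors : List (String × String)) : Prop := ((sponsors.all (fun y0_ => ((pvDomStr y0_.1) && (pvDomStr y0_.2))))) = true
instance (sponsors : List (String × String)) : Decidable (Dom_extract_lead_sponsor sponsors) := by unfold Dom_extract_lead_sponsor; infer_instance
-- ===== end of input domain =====

-- B collapses A's two sequential scans and indexed fallback into one single-pass loop (simpler decomposition; same cost).

-- ===== PORT A =====
-- first loop: return name of first entry with role "developer"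
def pvDevScan : List (String × String) → Option String
  | [] => none
  | (name, role) :: rest => if role == "developer" then some name else pvDevScan rest

-- second loop: return name of first entry with role "spv"
def pvSpvScan : List (String × String) → Option String
  | [] => none
  | (name, role) :: rest => if role == "spv" then some name else pvSpvScan rest

def extract_lead_sponsor (sponsors : List (String × String)) : String :=
  match pvDevScan sponsors with
  | some name => name
  | none =>
    match pvSpvScan sponsors with
    | some name => name
    | none => match sponsors with
      | [] => ""
      | (name, _) :: _ => name

-- ===== PORT B =====
-- single pass: return immediately on a developer; remember the first spv name and the first name
def pvAltLoop : List (String × String) → Option String → Option String → String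
  | [], spv, first =>
    match spv with
    | some s => s
    | none => match first with
      | some f => f
      | none => ""
  | (name, role) :: rest, spv, first =>
    if role == "developer" then name
    else pvAltLoop rest
      (if spv.isNone && role == "spv" then some name else spv)
      (if first.isNone then some name else first)

def extract_lead_sponsor_alt (sponsors : List (String × String)) : String :=
  pvAltLoop sponsors none none

-- ===== PRECONDITION & SPEC =====
def Spec_extract_lead_sponsor (sponsors : List (String × String)) (out : String) : Prop := out = extract_lead_sponsor_alt sponsors
instance (sponsors : List (String × String)) (out : String) : Decidable (Spec_extract_lead_sponsor sponsors out) := by unfold Spec_extract_lead_sponsor; infer_instance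

-- ===== CLAIM (what is proved, stated in full; the proofs are below) =====
def Claim_equal_extract_lead_sponsor : Prop := ∀ (sponsors : List (String × String)), Dom_extract_lead_sponsor sponsors → Spec_extract_lead_sponsor sponsors (extract_lead_sponsor sponsors)

-- ===== LEMMAS AND PROOFS =====
-- loop invariant: pvAltLoop with remembered spv/first equals A's priority cascade with those fallbacks
theorem pvAltLoop_eq (l : List (String × String)) : ∀ (spv first : Option String),
    pvAltLoop l spv first =
      match pvDevScan l with
      | some n => n
      | none =>
        match spv with
        | some s => s
        | none =>
          match pvSpvScan l with
          | some n => n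
          | none =>
            match first with
            | some f => f
            | none => match l with
              | [] => ""
              | (n, _) :: _ => n := by
  induction l with
  | nil => intro spv first; rfl
  | cons p rest ih =>
    intro spv first
    obtain ⟨name, role⟩ := p
    by_cases hd : role = "developer"
    · simp [pvAltLoop, pvDevScan, hd]
    · simp only [pvAltLoop, pvDevScan, pvSpvScan, beq_iff_eq, hd, if_false, ih]
      cases spv with
      | some s => simp
      | none =>
        by_cases hs : role = "spv"
        · simp [hs]
        · cases first <;> simp [hs]

-- ===== VERDICT (by name: the statement is the Claim_ definition above) =====
theorem extract_lead_sponsor_spec : Claim_equal_extract_lead_sponsor := by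
  intro sponsors _
  unfold Spec_extract_lead_sponsor extract_lead_sponsor extract_lead_sponsor_alt
  rw [pvAltLoop_eq]
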